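-- pv_equiv track=rewrite | github.com/Amagyei/global-banker | deactivate_mock_addresses.py | is_mock_address
-- ===== SOURCE A (Python) =====
-- def is_mock_address(address: str) -> bool:
--     """Check if an address is a mock address"""
--     if not address:
--         return False
--
--     # Mock Bitcoin mainnet: bc1 + 42 hex chars = 45 chars
--     if address.startswith('bc1') and len(address) == 45:
--         # Check if it's all hex after bc1
--         hex_part = address[3:]
--         if all(c in '0123456789abcdef' for c in hex_part.lower()):
--             return True
--
--     # Mock Bitcoin testnet: tb1 + 42 hex chars = 45 chars
--     if address.startswith('tb1') and len(address) == 45: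
--         hex_part = address[3:]
--         if all(c in '0123456789abcdef' for c in hex_part.lower()):
--             return True
--
--     # Mock Ethereum: 0x + 40 hex chars = 42 chars
--     if address.startswith('0x') and len(address) == 42:
--         hex_part = address[2:]
--         if all(c in '0123456789abcdef' for c in hex_part.lower()):
--             return True
--
--     return False
-- ===== SOURCE B (Python) =====
-- _HEX = '0123456789abcdefABCDEF'
--
--
-- def is_mock_address(address: str) -> bool:
--     """Check if an address is a mock address (single-pass DFA over the characters)."""
--     # States: 0 start; 1 'b'; 2 'bc'; 3 't'; 4 'tb'; 5 '0'; 6 hex-counting; -1 dead.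
--     state, rem = 0, 0
--     for c in address:
--         if state == 6:
--             if rem > 0 and c in _HEX:
--                 rem -= 1
--             else:
--                 state = -1
--         elif state == 0:
--             if c == 'b':
--                 state = 1
--             elif c == 't':
--                 state = 3
--             elif c == '0':
--                 state = 5
--             else:
--                 state = -1
--         elif state == 1:
--             state = 2 if c == 'c' else -1
--         elif state == 2:
--             if c == '1':
--                 state, rem = 6, 42
--             else:
--                 state = -1
--         elif state == 3:
--             state = 4 if c == 'b' else -1
--         elif state == 4:
--             if c == '1':
--                 state, rem = 6, 42
--             else:
--                 state = -1
--         elif state == 5: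
--             if c == 'x':
--                 state, rem = 6, 40
--             else:
--                 state = -1
--     return state == 6 and rem == 0
-- ===== Notes on version B (the rewrite author's own statement) =====
-- stated objective: alternative
-- what changed: Replaces A's three slice-then-scan prefix/length/lowercase-hex blocks by a single left-to-right pass of a hand-rolled finite-state machine (prefix states plus a hex-character countdown), deciding acceptance from the final state.
import Mathlib
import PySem

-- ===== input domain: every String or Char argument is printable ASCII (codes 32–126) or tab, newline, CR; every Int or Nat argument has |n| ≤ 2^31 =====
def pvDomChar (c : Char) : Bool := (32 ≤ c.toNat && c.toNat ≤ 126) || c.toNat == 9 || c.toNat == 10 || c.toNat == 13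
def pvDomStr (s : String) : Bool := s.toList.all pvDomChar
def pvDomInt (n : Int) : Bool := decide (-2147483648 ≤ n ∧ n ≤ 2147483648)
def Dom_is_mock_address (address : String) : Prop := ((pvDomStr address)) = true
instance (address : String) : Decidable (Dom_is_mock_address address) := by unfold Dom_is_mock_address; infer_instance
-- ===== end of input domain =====

-- B replaces A's three slice-and-scan prefix blocks by a single left-to-right pass of a
-- hand-rolled finite-state machine (prefix states + a hex countdown) over the characters (alternative).


-- ===== PORT A =====
-- 'all(c in '0123456789abcdef' for c in hex_part.lower())'
def pvAHexLow (part : List Char) : Bool :=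
  (PySem.Chars.lower part).all (fun c => ("0123456789abcdef".toList).contains c)

def is_mock_address (address : String) : Bool :=
  let cs := address.toList
  if cs.isEmpty then false
  else if PySem.Chars.startswith cs "bc1".toList && cs.length == 45
          && pvAHexLow (PySem.Chars.slice cs (some 3) none) then true
  else if PySem.Chars.startswith cs "tb1".toList && cs.length == 45
          && pvAHexLow (PySem.Chars.slice cs (some 3) none) then true
  else if PySem.Chars.startswith cs "0x".toList && cs.length == 42
          && pvAHexLow (PySem.Chars.slice cs (some 2) none) then true
  else false

-- ===== PORT B =====
-- 'c in _HEX'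
def pvHexB (c : Char) : Bool := ("0123456789abcdefABCDEF".toList).contains c

-- one loop iteration of the Python DFA: state = s.1, rem = s.2
def pvStep (s : Int × Int) (c : Char) : Int × Int :=
  if s.1 == 6 then
    (if s.2 > 0 && pvHexB c then (6, s.2 - 1) else (-1, s.2))
  else if s.1 == 0 then
    (if c == 'b' then (1, s.2) else if c == 't' then (3, s.2)
     else if c == '0' then (5, s.2) else (-1, s.2))
  else if s.1 == 1 then (if c == 'c' then (2, s.2) else (-1, s.2))
  else if s.1 == 2 then (if c == '1' then (6, 42) else (-1, s.2))
  else if s.1 == 3 then (if c == 'b' then (4, s.2) else (-1, s.2))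
  else if s.1 == 4 then (if c == '1' then (6, 42) else (-1, s.2))
  else if s.1 == 5 then (if c == 'x' then (6, 40) else (-1, s.2))
  else s  -- dead state: pass

def is_mock_address_alt (address : String) : Bool :=
  let f := address.toList.foldl pvStep (0, 0)
  f.1 == 6 && f.2 == 0

-- ===== PRECONDITION & SPEC =====
def Spec_is_mock_address (address : String) (out : Bool) : Prop := out = is_mock_address_alt address
instance (address : String) (out : Bool) : Decidable (Spec_is_mock_address address out) := by unfold Spec_is_mock_address; infer_instance

-- ===== CLAIM (what is proved, stated in full; the proofs are below) =====
def Claim_equal_is_mock_address : Prop := ∀ (address : String), Dom_is_mock_address address → Spec_is_mock_address address (is_mock_address address)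

-- ===== LEMMAS AND PROOFS =====

-- per-character: on ASCII, 'lowercase then lowercase-hex' = 'case-insensitive hex membership'
set_option maxRecDepth 4000 in
theorem pv_hex_char_nat : ∀ n : Nat, n < 127 →
    ("0123456789abcdef".toList).contains (PySem.Chars.lowerChar (Char.ofNat n))
      = pvHexB (Char.ofNat n) := by decide

theorem pv_hex_char (c : Char) (h : pvDomChar c = true) :
    ("0123456789abcdef".toList).contains (PySem.Chars.lowerChar c) = pvHexB c := by
  have hn : c.toNat < 127 := by
    simp only [pvDomChar, Bool.or_eq_true, Bool.and_eq_true, decide_eq_true_eq,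
      beq_iff_eq] at h
    omega
  have := pv_hex_char_nat c.toNat hn
  rwa [Char.ofNat_toNat] at this

theorem pv_hex_all (l : List Char) (h : ∀ c ∈ l, pvDomChar c = true) :
    pvAHexLow l = l.all pvHexB := by
  induction l with
  | nil => rfl
  | cons a t ih =>
    simp only [pvAHexLow, PySem.Chars.lower, List.map_cons, List.all_cons] at *
    rw [pv_hex_char a (h a (by simp)), ih (fun c hc => h c (by simp [hc]))]

-- the dead state absorbs
theorem pv_dead (r : List Char) (x : Int) : r.foldl pvStep (-1, x) = (-1, x) := by
  induction r with
  | nil => rfl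
  | cons c t ih => simpa [pvStep] using ih

-- the hex countdown: accepting from (6, rem) means exactly rem hex characters remain
theorem pv_hexRun (r : List Char) : ∀ rem : Int,
    ((r.foldl pvStep (6, rem)).1 == 6 && (r.foldl pvStep (6, rem)).2 == 0)
      = (rem == (r.length : Int) && r.all pvHexB) := by
  induction r with
  | nil => intro rem; simp
  | cons c t ih =>
    intro rem
    by_cases hc : pvHexB c
    · by_cases hr : rem > 0
      · have : pvStep (6, rem) c = (6, rem - 1) := by simp [pvStep, hc, hr]
        simp only [List.foldl_cons, this, ih, List.all_cons, hc, List.length_cons,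
          Bool.true_and]
        have : (rem - 1 == (t.length : Int)) = (rem == ((t.length : Nat) + 1 : Int)) := by
          by_cases h : rem - 1 = (t.length : Int) <;> simp [h] <;> omega
        rw [this]; push_cast; ring_nf
      · have : pvStep (6, rem) c = (-1, rem) := by simp [pvStep, hr]
        simp only [List.foldl_cons, this, pv_dead, List.length_cons]
        have : ¬ rem = ((t.length : Nat) + 1 : Int) := by omega
        simp [this]
    · have : pvStep (6, rem) c = (-1, rem) := by simp [pvStep, hc]
      simp only [List.foldl_cons, this, pv_dead, List.all_cons, hc]
      simp

-- slices A takes are drops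
theorem pv_slice3 (cs : List Char) : PySem.Chars.slice cs (some 3) none = cs.drop 3 := by
  simpa using PySem.List.slice_from_natCast cs 3

theorem pv_slice2 (cs : List Char) : PySem.Chars.slice cs (some 2) none = cs.drop 2 := by
  simpa using PySem.List.slice_from_natCast cs 2

-- the accepted-branch shape: prefix matched, A's remaining checks vs B's countdown
theorem pv_branch (r : List Char) (n m : Nat) (hall : ∀ c ∈ r, pvDomChar c = true) :
    ((r.length + n == m + n : Bool) && pvAHexLow r)
      = ((m : Int) == (r.length : Int) && r.all pvHexB) := by
  rw [pv_hex_all r hall]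
  by_cases h : r.length = m
  · simp [h]
  · have h1 : (r.length + n == m + n) = false := by simp; omega
    have h2 : ((m : Int) == (r.length : Int)) = false := by
      simp; intro e; exact h (by exact_mod_cast e.symm)
    simp [h1, h2]

-- A's if-chain equals B's DFA run, at the character-list level
theorem pv_main (cs : List Char) (hall : ∀ c ∈ cs, pvDomChar c = true) :
    (if cs.isEmpty then false
     else if PySem.Chars.startswith cs "bc1".toList && cs.length == 45
             && pvAHexLow (PySem.Chars.slice cs (some 3) none) then true
     else if PySem.Chars.startswith cs "tb1".toList && cs.length == 45
             && pvAHexLow (PySem.Chars.slice cs (some 3) none) then true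
     else if PySem.Chars.startswith cs "0x".toList && cs.length == 42
             && pvAHexLow (PySem.Chars.slice cs (some 2) none) then true
     else false)
    = ((cs.foldl pvStep (0, 0)).1 == 6 && (cs.foldl pvStep (0, 0)).2 == 0) := by
  rcases cs with _ | ⟨c1, cs1⟩
  · decide
  by_cases h1b : c1 = 'b'
  · subst h1b
    rcases cs1 with _ | ⟨c2, cs2⟩
    · decide
    by_cases h2 : c2 = 'c'
    · subst h2
      rcases cs2 with _ | ⟨c3, r⟩
      · decide
      by_cases h3 : c3 = '1'
      · subst h3
        have hr : ∀ c ∈ r, pvDomChar c = true := fun c hc => hall c (by simp [hc])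
        have hfold : ('b'::'c'::'1'::r).foldl pvStep (0, 0) = r.foldl pvStep (6, 42) := by
          simp [pvStep]
        rw [hfold]
        rw [show ((PySem.Chars.startswith ('b'::'c'::'1'::r) "bc1".toList)) = true by
              simp [PySem.Chars.startswith, List.isPrefixOf],
            show ((PySem.Chars.startswith ('b'::'c'::'1'::r) "tb1".toList)) = false by
              simp [PySem.Chars.startswith, List.isPrefixOf],
            show ((PySem.Chars.startswith ('b'::'c'::'1'::r) "0x".toList)) = false by
              simp [PySem.Chars.startswith, List.isPrefixOf],
            pv_slice3, pv_hexRun r 42]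
        simp only [List.drop_succ_cons, List.drop_zero, List.length_cons, List.isEmpty_cons,
          Bool.false_eq_true, if_false, Bool.true_and, Bool.false_and]
        rw [show r.length + 1 + 1 + 1 = r.length + 3 by ring]
        have := pv_branch r 3 42 hr
        simp only [show (42 + 3 : Nat) = 45 from rfl] at this
        rw [this]
        cases hres : ((42 : Int) == (r.length : Int) && r.all pvHexB) <;> simp_all
      · have hfold : ('b'::'c'::c3::r).foldl pvStep (0, 0) = (-1, 0) := by
          simp [pvStep, h3, pv_dead]
        rw [hfold]
        simp [PySem.Chars.startswith, List.isPrefixOf, Ne.symm h3]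
    · have hfold : ('b'::c2::cs2).foldl pvStep (0, 0) = (-1, 0) := by
        simp [pvStep, h2, pv_dead]
      rw [hfold]
      simp [PySem.Chars.startswith, List.isPrefixOf, Ne.symm h2]
  by_cases h1t : c1 = 't'
  · subst h1t
    rcases cs1 with _ | ⟨c2, cs2⟩
    · decide
    by_cases h2 : c2 = 'b'
    · subst h2
      rcases cs2 with _ | ⟨c3, r⟩
      · decide
      by_cases h3 : c3 = '1'
      · subst h3
        have hr : ∀ c ∈ r, pvDomChar c = true := fun c hc => hall c (by simp [hc])
        have hfold : ('t'::'b'::'1'::r).foldl pvStep (0, 0) = r.foldl pvStep (6, 42) := by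
          simp [pvStep]
        rw [hfold]
        rw [show ((PySem.Chars.startswith ('t'::'b'::'1'::r) "bc1".toList)) = false by
              simp [PySem.Chars.startswith, List.isPrefixOf],
            show ((PySem.Chars.startswith ('t'::'b'::'1'::r) "tb1".toList)) = true by
              simp [PySem.Chars.startswith, List.isPrefixOf],
            show ((PySem.Chars.startswith ('t'::'b'::'1'::r) "0x".toList)) = false by
              simp [PySem.Chars.startswith, List.isPrefixOf],
            pv_slice3, pv_hexRun r 42]
        simp only [List.drop_succ_cons, List.drop_zero, List.length_cons, List.isEmpty_cons,
          Bool.false_eq_true, if_false, Bool.true_and, Bool.false_and]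
        rw [show r.length + 1 + 1 + 1 = r.length + 3 by ring]
        have := pv_branch r 3 42 hr
        simp only [show (42 + 3 : Nat) = 45 from rfl] at this
        rw [this]
        cases hres : ((42 : Int) == (r.length : Int) && r.all pvHexB) <;> simp_all
      · have hfold : ('t'::'b'::c3::r).foldl pvStep (0, 0) = (-1, 0) := by
          simp [pvStep, h3, pv_dead]
        rw [hfold]
        simp [PySem.Chars.startswith, List.isPrefixOf, Ne.symm h3]
    · have hfold : ('t'::c2::cs2).foldl pvStep (0, 0) = (-1, 0) := by
        simp [pvStep, h2, pv_dead]
      rw [hfold]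
      simp [PySem.Chars.startswith, List.isPrefixOf, Ne.symm h2]
  by_cases h10 : c1 = '0'
  · subst h10
    rcases cs1 with _ | ⟨c2, r⟩
    · decide
    by_cases h2 : c2 = 'x'
    · subst h2
      have hr : ∀ c ∈ r, pvDomChar c = true := fun c hc => hall c (by simp [hc])
      have hfold : ('0'::'x'::r).foldl pvStep (0, 0) = r.foldl pvStep (6, 40) := by
        simp [pvStep]
      rw [hfold]
      rw [show ((PySem.Chars.startswith ('0'::'x'::r) "bc1".toList)) = false by
            simp [PySem.Chars.startswith, List.isPrefixOf],
          show ((PySem.Chars.startswith ('0'::'x'::r) "tb1".toList)) = false by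
            simp [PySem.Chars.startswith, List.isPrefixOf],
          show ((PySem.Chars.startswith ('0'::'x'::r) "0x".toList)) = true by
            simp [PySem.Chars.startswith, List.isPrefixOf],
          pv_slice2, pv_hexRun r 40]
      simp only [List.drop_succ_cons, List.drop_zero, List.length_cons, List.isEmpty_cons,
        Bool.false_eq_true, if_false, Bool.true_and, Bool.false_and]
      rw [show r.length + 1 + 1 = r.length + 2 by ring]
      have := pv_branch r 2 40 hr
      simp only [show (40 + 2 : Nat) = 42 from rfl] at this
      rw [this]
      cases hres : ((40 : Int) == (r.length : Int) && r.all pvHexB) <;> simp_all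
    · have hfold : ('0'::c2::r).foldl pvStep (0, 0) = (-1, 0) := by
        simp [pvStep, h2, pv_dead]
      rw [hfold]
      simp [PySem.Chars.startswith, List.isPrefixOf, Ne.symm h2]
  · have hfold : (c1::cs1).foldl pvStep (0, 0) = (-1, 0) := by
      simp [pvStep, h1b, h1t, h10, pv_dead]
    rw [hfold]
    simp [PySem.Chars.startswith, List.isPrefixOf, Ne.symm h1b, Ne.symm h1t, Ne.symm h10]

-- ===== VERDICT (by name: the statement is the Claim_ definition above) =====
theorem is_mock_address_spec : Claim_equal_is_mock_address := by
  intro address hdom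
  unfold Spec_is_mock_address
  have hall : ∀ c ∈ address.toList, pvDomChar c = true := by
    simpa [Dom_is_mock_address, pvDomStr, List.all_eq_true] using hdom
  exact pv_main address.toList hall
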